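-- pv_equiv track=rewrite | github.com/Project-Phaistos/Ventris1 | pillar1/scripts/jaccard_sign_classification.py | build_lb_ground_truth
-- ===== SOURCE A (Python) =====
-- from collections import Counter, defaultdict
--
-- def extract_consonant(sign: str) -> str:
--     """Extract consonant part from a CV sign name."""
--     base = sign.rstrip("0123456789")
--     if not base:
--         return sign
--     if base in ("a", "e", "i", "o", "u"):
--         return "V"
--     if len(base) == 3 and base[1] == "w":
--         return base[:2]
--     if base[-1] in "aeiou":
--         return base[:-1]
--     return base
--
-- def extract_vowel(sign: str) -> str | None:
--     """Extract vowel part from a CV sign name."""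
--     base = sign.rstrip("0123456789")
--     if not base:
--         return None
--     if base in ("a", "e", "i", "o", "u"):
--         return base
--     if base[-1] in "aeiou":
--         return base[-1]
--     return None
--
-- def build_lb_ground_truth(
--     signs: list[str], sign_to_ipa: dict,
-- ) -> tuple[dict[str, int], dict[str, int]]:
--     """Build consonant and vowel ground-truth integer labels for Linear B signs."""
--     cons_series: dict[str, list[str]] = defaultdict(list)
--     vowel_classes: dict[str, list[str]] = defaultdict(list)
--
--     for sign in signs:
--         if sign not in sign_to_ipa or sign_to_ipa[sign] == "-":
--             continue
--         c = extract_consonant(sign)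
--         v = extract_vowel(sign)
--         cons_series[c].append(sign)
--         if v:
--             vowel_classes[v].append(sign)
--
--     cons_label: dict[str, int] = {}
--     cons_names = sorted(cons_series.keys())
--     for idx, name in enumerate(cons_names):
--         for s in cons_series[name]:
--             cons_label[s] = idx
--
--     vowel_label: dict[str, int] = {}
--     vowel_names = sorted(vowel_classes.keys())
--     for idx, name in enumerate(vowel_names):
--         for s in vowel_classes[name]:
--             vowel_label[s] = idx
--
--     return cons_label, vowel_label
-- ===== SOURCE B (Python) =====
-- def extract_consonant(sign: str) -> str:
--     """Extract consonant part from a CV sign name."""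
--     base = sign.rstrip("0123456789")
--     if not base:
--         return sign
--     if base in ("a", "e", "i", "o", "u"):
--         return "V"
--     if len(base) == 3 and base[1] == "w":
--         return base[:2]
--     if base[-1] in "aeiou":
--         return base[:-1]
--     return base
--
-- def extract_vowel(sign: str) -> str | None:
--     """Extract vowel part from a CV sign name."""
--     base = sign.rstrip("0123456789")
--     if not base:
--         return None
--     if base in ("a", "e", "i", "o", "u"):
--         return base
--     if base[-1] in "aeiou":
--         return base[-1]
--     return None
--
-- def _dense_labels(pairs):
--     """Stable-sort (key, sign) pairs by key and assign each sign the dense rank of its key."""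
--     label = {}
--     prev = None
--     idx = -1
--     for key, s in sorted(pairs, key=lambda p: p[0]):
--         if prev != key:
--             idx += 1
--             prev = key
--         label[s] = idx
--     return label
--
-- def build_lb_ground_truth(signs, sign_to_ipa):
--     valid = [s for s in signs if sign_to_ipa.get(s, "-") != "-"]
--     cons_pairs = [(extract_consonant(s), s) for s in valid]
--     vowel_pairs = [(v, s) for s in valid if (v := extract_vowel(s))]
--     return _dense_labels(cons_pairs), _dense_labels(vowel_pairs)
-- ===== Notes on version B (the rewrite author's own statement) =====
-- stated objective: alternative
-- what changed: B drops A's defaultdict-of-per-class-sign-lists and the nested enumerate(sorted-classes)/members labeling loops: it collects (class, sign) pairs in one filtered pass, stable-sorts them by class, and assigns dense ranks in a single scan that bumps the label whenever the class key changes.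
import Mathlib
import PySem

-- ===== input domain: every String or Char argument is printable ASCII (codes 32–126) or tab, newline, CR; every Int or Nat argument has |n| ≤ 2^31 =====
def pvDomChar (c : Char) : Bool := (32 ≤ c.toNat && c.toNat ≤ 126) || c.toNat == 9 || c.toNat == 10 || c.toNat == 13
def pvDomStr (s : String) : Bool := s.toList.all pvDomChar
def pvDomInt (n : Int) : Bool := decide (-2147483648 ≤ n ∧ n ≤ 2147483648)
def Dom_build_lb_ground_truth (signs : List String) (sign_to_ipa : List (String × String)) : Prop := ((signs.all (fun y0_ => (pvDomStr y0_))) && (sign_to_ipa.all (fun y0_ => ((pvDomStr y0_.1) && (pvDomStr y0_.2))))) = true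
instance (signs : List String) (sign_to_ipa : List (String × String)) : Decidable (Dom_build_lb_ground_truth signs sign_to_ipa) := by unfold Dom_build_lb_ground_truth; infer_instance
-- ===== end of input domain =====

-- B replaces A's per-class sign lists and nested label loops by one stable sort of (class, sign)
-- pairs followed by a single dense-rank scan (objective: alternative, same asymptotic cost).

-- ===== PORT A =====
-- shared module helpers (used by both A and B in Python)

-- hand port of s.rstrip("0123456789"): drop trailing chars of that set (Char.isDigit is exactly '0'..'9'); exact
def pyRstripDigits (cs : List Char) : List Char := (cs.reverse.dropWhile (fun c => c.isDigit)).reverse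

def extract_consonant (sign : String) : String :=
  let base := pyRstripDigits sign.toList
  if base = [] then sign
  else if base = ['a'] ∨ base = ['e'] ∨ base = ['i'] ∨ base = ['o'] ∨ base = ['u'] then "V"
  else if base.length = 3 ∧ base.getD 1 ' ' = 'w' then String.mk (base.take 2)
  else if base.getLastD ' ' ∈ ['a', 'e', 'i', 'o', 'u'] then String.mk base.dropLast  -- base ≠ [] here, so base[-1] is getLastD
  else String.mk base

def extract_vowel (sign : String) : Option String :=
  let base := pyRstripDigits sign.toList
  if base = [] then none
  else if base = ['a'] ∨ base = ['e'] ∨ base = ['i'] ∨ base = ['o'] ∨ base = ['u'] then some (String.mk base)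
  else if base.getLastD ' ' ∈ ['a', 'e', 'i', 'o', 'u'] then some (String.mk [base.getLastD ' '])  -- base ≠ [] here
  else none

def build_lb_ground_truth (signs : List String) (sign_to_ipa : List (String × String)) : (List (String × Int)) × (List (String × Int)) :=
  let ipa : PySem.Dict String String := PySem.Dict.ofList sign_to_ipa
  let st := signs.foldl
    (fun (st : PySem.Dict String (List String) × PySem.Dict String (List String)) sign =>
      match ipa.get? sign with
      | none => st
      | some x =>
        if x = "-" then st
        else
          let c := extract_consonant sign
          let v := extract_vowel sign
          (st.1.modify c [] (fun l => l ++ [sign]),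
           match v with
           | some vv => if vv = "" then st.2 else st.2.modify vv [] (fun l => l ++ [sign])  -- 'if v:' truthiness
           | none => st.2))
    (PySem.Dict.empty, PySem.Dict.empty)
  let cons_names := PySem.List.sorted st.1.keys (fun k => k) false
  let cons_label := (cons_names.zipIdx).foldl
    (fun (d : PySem.Dict String Int) p => (st.1.getD p.1 []).foldl (fun d s => d.insert s ((p.2 : Nat) : Int)) d)
    PySem.Dict.empty
  let vowel_names := PySem.List.sorted st.2.keys (fun k => k) false
  let vowel_label := (vowel_names.zipIdx).foldl
    (fun (d : PySem.Dict String Int) p => (st.2.getD p.1 []).foldl (fun d s => d.insert s ((p.2 : Nat) : Int)) d)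
    PySem.Dict.empty
  (cons_label.items, vowel_label.items)

-- ===== PORT B =====
-- the loop body of _dense_labels, state = (label dict, prev, idx)
def pvBStep (st : PySem.Dict String Int × Option String × Int) (q : String × String) :
    PySem.Dict String Int × Option String × Int :=
  if st.2.1 ≠ some q.1 then (st.1.insert q.2 (st.2.2 + 1), some q.1, st.2.2 + 1)
  else (st.1.insert q.2 st.2.2, st.2.1, st.2.2)

def dense_labels (pairs : List (String × String)) : List (String × Int) :=
  ((PySem.List.sorted pairs (fun p => p.1) false).foldl pvBStep (PySem.Dict.empty, none, -1)).1.items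

def build_lb_ground_truth_alt (signs : List String) (sign_to_ipa : List (String × String)) : (List (String × Int)) × (List (String × Int)) :=
  let ipa : PySem.Dict String String := PySem.Dict.ofList sign_to_ipa
  let valid := signs.filter (fun s => ipa.getD s "-" ≠ "-")
  let cons_pairs := valid.map (fun s => (extract_consonant s, s))
  let vowel_pairs := valid.filterMap (fun s =>
    match extract_vowel s with
    | some v => if v = "" then none else some (v, s)  -- walrus 'if (v := extract_vowel(s))' truthiness
    | none => none)
  (dense_labels cons_pairs, dense_labels vowel_pairs)

-- ===== PRECONDITION & SPEC =====
def Spec_build_lb_ground_truth (signs : List String) (sign_to_ipa : List (String × String)) (out : (List (String × Int)) × (List (String × Int))) : Prop := out = build_lb_ground_truth_alt signs sign_to_ipa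
instance (signs : List String) (sign_to_ipa : List (String × String)) (out : (List (String × Int)) × (List (String × Int))) : Decidable (Spec_build_lb_ground_truth signs sign_to_ipa out) := by unfold Spec_build_lb_ground_truth; infer_instance

-- ===== CLAIM (what is proved, stated in full; the proofs are below) =====
def Claim_equal_build_lb_ground_truth : Prop := ∀ (signs : List String) (sign_to_ipa : List (String × String)), Dom_build_lb_ground_truth signs sign_to_ipa → Spec_build_lb_ground_truth signs sign_to_ipa (build_lb_ground_truth signs sign_to_ipa)

-- ===== LEMMAS AND PROOFS =====

-- the grouped arrangement of the pairs l: for each key of ks, the block of pairs of l with that key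
def pvBlocks (l : List (String × String)) (ks : List String) : List (String × String) :=
  ks.flatMap (fun k => l.filter (fun p => p.1 == k))

theorem pvInsertBy_append_left {α : Type} (bf : α → α → Bool) (x : α) (as bs : List α)
    (h : ∀ a ∈ as, bf x a = false) :
    PySem.List.insertBy bf x (as ++ bs) = as ++ PySem.List.insertBy bf x bs := by
  induction as with
  | nil => simp
  | cons a t ih =>
    simp only [List.cons_append, PySem.List.insertBy, h a (by simp)]
    simp only [Bool.false_eq_true, if_false, List.cons.injEq, true_and]
    exact ih (fun a ha => h a (by simp [ha]))

theorem pvInsertBy_all_before {α : Type} (bf : α → α → Bool) (x : α) (ys : List α)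
    (h : ∀ a ∈ ys, bf x a = true) :
    PySem.List.insertBy bf x ys = x :: ys := by
  cases ys with
  | nil => simp [PySem.List.insertBy]
  | cons y t => simp [PySem.List.insertBy, h y (by simp)]

theorem pvSorted_append_singleton {α κ : Type} [LT κ] [DecidableLT κ] (xs : List α) (x : α) (key : α → κ) :
    PySem.List.sorted (xs ++ [x]) key false
      = PySem.List.insertBy (fun a b => decide (key a < key b)) x (PySem.List.sorted xs key false) := by
  rw [PySem.List.sorted_eq_foldl_insertBy, PySem.List.sorted_eq_foldl_insertBy, List.foldl_append]
  rfl

theorem pvFst_mem_of_mem_blocks {l : List (String × String)} {ks : List String} {a : String × String}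
    (h : a ∈ pvBlocks l ks) : a.1 ∈ ks := by
  simp only [pvBlocks, List.mem_flatMap, List.mem_filter, beq_iff_eq] at h
  obtain ⟨k, hk, _, he⟩ := h
  exact he ▸ hk

theorem pvBlocks_snoc_not_mem (l : List (String × String)) (p : String × String) :
    ∀ ks : List String, p.1 ∉ ks → pvBlocks (l ++ [p]) ks = pvBlocks l ks := by
  intro ks
  induction ks with
  | nil => intro _; rfl
  | cons k t ih =>
    intro h
    simp only [List.mem_cons, not_or] at h
    have hpk : (p.1 == k) = false := by simp [h.1]
    have ht := ih h.2
    simp only [pvBlocks, List.flatMap_cons] at *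
    rw [ht, List.filter_append, List.filter_singleton]
    simp [hpk]

theorem pvInsert_blocks_mem (l : List (String × String)) (p : String × String) :
    ∀ ks : List String, ks.Pairwise (· < ·) → p.1 ∈ ks →
      PySem.List.insertBy (fun a b : String × String => decide (a.1 < b.1)) p (pvBlocks l ks)
        = pvBlocks (l ++ [p]) ks := by
  intro ks
  induction ks with
  | nil => intro _ h; simp at h
  | cons k t ih =>
    intro hpw hmem
    have hpwk := (List.pairwise_cons.mp hpw).1
    have hpwt := (List.pairwise_cons.mp hpw).2
    by_cases hk : p.1 = k
    · -- p joins the block of k; everything after has strictly larger key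
      have hnot_t : p.1 ∉ t := fun hmt => absurd (hpwk _ hmt) (by simp [hk])
      have h1 : ∀ a ∈ l.filter (fun q => q.1 == k), (fun a b : String × String => decide (a.1 < b.1)) p a = false := by
        intro a ha
        have ha1 : a.1 = k := by simpa [beq_iff_eq] using (List.mem_filter.mp ha).2
        show decide (p.1 < a.1) = false
        simp only [ha1, hk, decide_eq_false_iff_not]
        exact lt_irrefl k
      have h2 : ∀ a ∈ pvBlocks l t, (fun a b : String × String => decide (a.1 < b.1)) p a = true := by
        intro a ha
        have := pvFst_mem_of_mem_blocks ha
        show decide (p.1 < a.1) = true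
        simp [hk, hpwk _ this]
      simp only [pvBlocks, List.flatMap_cons]
      rw [pvInsertBy_append_left _ _ _ _ h1, pvInsertBy_all_before _ _ _ h2]
      have hpk : (p.1 == k) = true := by simp [hk]
      have hfk : List.filter (fun q => q.1 == k) (l ++ [p]) = List.filter (fun q => q.1 == k) l ++ [p] := by
        rw [List.filter_append, List.filter_singleton]
        simp [hpk]
      rw [hfk]
      have := pvBlocks_snoc_not_mem l p t hnot_t
      simp only [pvBlocks] at this
      rw [this]
      simp
    · -- p belongs further right: skip the k-block
      have hmt : p.1 ∈ t := by
        rcases List.mem_cons.mp hmem with h | h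
        · exact absurd h hk
        · exact h
      have hklt : k < p.1 := hpwk _ hmt
      have h1 : ∀ a ∈ l.filter (fun q => q.1 == k), (fun a b : String × String => decide (a.1 < b.1)) p a = false := by
        intro a ha
        have ha1 : a.1 = k := by simpa [beq_iff_eq] using (List.mem_filter.mp ha).2
        show decide (p.1 < a.1) = false
        simp only [ha1, decide_eq_false_iff_not]
        exact not_lt.mpr hklt.le
      simp only [pvBlocks, List.flatMap_cons]
      rw [pvInsertBy_append_left _ _ _ _ h1]
      have hpk : (p.1 == k) = false := by simp [hk]
      have hfk : List.filter (fun q => q.1 == k) (l ++ [p]) = List.filter (fun q => q.1 == k) l := by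
        rw [List.filter_append, List.filter_singleton]
        simp [hpk]
      rw [hfk]
      have := ih hpwt hmt
      simp only [pvBlocks] at this
      rw [this]

theorem pvInsert_blocks_new (l : List (String × String)) (p : String × String) :
    ∀ ks : List String, ks.Pairwise (· < ·) → p.1 ∉ ks →
      l.filter (fun q => q.1 == p.1) = [] →
      PySem.List.insertBy (fun a b : String × String => decide (a.1 < b.1)) p (pvBlocks l ks)
        = pvBlocks (l ++ [p]) (PySem.List.insertBy (fun a b : String => decide (a < b)) p.1 ks) := by
  intro ks
  induction ks with
  | nil =>
    intro _ _ hf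
    simp only [pvBlocks, PySem.List.insertBy, List.flatMap_cons, List.flatMap_nil,
      List.filter_append, hf, List.filter_singleton]
    simp
  | cons k t ih =>
    intro hpw hnm hf
    have hpwk := (List.pairwise_cons.mp hpw).1
    have hpwt := (List.pairwise_cons.mp hpw).2
    simp only [List.mem_cons, not_or] at hnm
    by_cases hlt : p.1 < k
    · -- p's key is new and smallest: it goes in front
      have hall : ∀ a ∈ pvBlocks l (k :: t), (fun a b : String × String => decide (a.1 < b.1)) p a = true := by
        intro a ha
        have h1 := pvFst_mem_of_mem_blocks ha
        show decide (p.1 < a.1) = true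
        rcases List.mem_cons.mp h1 with h | h
        · simp [h, hlt]
        · simp [lt_trans hlt (hpwk _ h)]
      rw [pvInsertBy_all_before _ _ _ hall]
      have hnm2 : p.1 ∉ (k :: t) := by
        intro h
        rcases List.mem_cons.mp h with h | h
        · exact absurd h hnm.1
        · exact absurd h hnm.2
      have hB := pvBlocks_snoc_not_mem l p (k :: t) hnm2
      simp only [PySem.List.insertBy, hlt, decide_true, if_true]
      simp only [pvBlocks, List.flatMap_cons] at *
      rw [hB]
      have hself : (p.1 == p.1) = true := by simp
      rw [List.filter_append, List.filter_singleton]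
      simp [hf, hself]
    · -- k < p.1: keep the k-block, insert into the tail
      have hklt : k < p.1 := lt_of_le_of_ne (not_lt.mp hlt) (Ne.symm hnm.1)
      have h1 : ∀ a ∈ l.filter (fun q => q.1 == k), (fun a b : String × String => decide (a.1 < b.1)) p a = false := by
        intro a ha
        have ha1 : a.1 = k := by simpa [beq_iff_eq] using (List.mem_filter.mp ha).2
        show decide (p.1 < a.1) = false
        simp only [ha1, decide_eq_false_iff_not]
        exact not_lt.mpr hklt.le
      have hpk : (p.1 == k) = false := by simp [hnm.1]
      have hfk : List.filter (fun q => q.1 == k) (l ++ [p]) = List.filter (fun q => q.1 == k) l := by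
        rw [List.filter_append, List.filter_singleton]
        simp [hpk]
      have hrec := ih hpwt hnm.2 hf
      simp only [pvBlocks] at hrec
      simp only [PySem.List.insertBy, hlt, decide_false, Bool.false_eq_true, if_false]
      simp only [pvBlocks, List.flatMap_cons]
      rw [pvInsertBy_append_left _ _ _ _ h1, hfk, hrec]

-- Python's stable sort of (key, sign) pairs by key IS the grouped arrangement over the sorted distinct keys
theorem pvSorted_pairs_eq_blocks (l : List (String × String)) :
    PySem.List.sorted l (fun p => p.1) false
      = pvBlocks l (PySem.List.sorted (PySem.Set.ofList (l.map (fun p => p.1))) (fun k => k) false) := by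
  induction l using List.reverseRecOn with
  | nil => rfl
  | append_singleton l p ih =>
    have hpw := PySem.List.sorted_ofList_pairwise_lt (l.map (fun p : String × String => p.1))
    rw [pvSorted_append_singleton, ih]
    have hkeys : PySem.Set.ofList ((l ++ [p]).map (fun p : String × String => p.1))
        = PySem.Set.add (PySem.Set.ofList (l.map (fun p : String × String => p.1))) p.1 := by
      rw [List.map_append]
      exact PySem.Set.ofList_append_singleton _ _
    by_cases hp : p.1 ∈ PySem.Set.ofList (l.map (fun p : String × String => p.1))
    · rw [hkeys, PySem.Set.add_of_mem hp]
      exact pvInsert_blocks_mem l p _ hpw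
        ((PySem.List.mem_sorted _ _ _ _).mpr hp)
    · have hnm : p.1 ∉ PySem.List.sorted (PySem.Set.ofList (l.map (fun p : String × String => p.1))) (fun k => k) false :=
        fun h => hp ((PySem.List.mem_sorted _ _ _ _).mp h)
      have hf : l.filter (fun q => q.1 == p.1) = [] := by
        rw [List.filter_eq_nil_iff]
        intro q hq hbe
        exact hp ((PySem.Set.mem_ofList _ _).mpr (List.mem_map.mpr ⟨q, hq, by simpa [beq_iff_eq] using hbe⟩))
      rw [hkeys, PySem.Set.add_of_not_mem hp, pvSorted_append_singleton]
      exact pvInsert_blocks_new l p _ hpw hnm hf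

-- a constant-key block only inserts, leaving prev and idx alone
theorem pvScan_const (k : String) :
    ∀ (xs : List (String × String)) (i : Int) (d : PySem.Dict String Int),
      (∀ q ∈ xs, q.1 = k) →
      xs.foldl pvBStep (d, some k, i) = (xs.foldl (fun d q => d.insert q.2 i) d, some k, i) := by
  intro xs
  induction xs with
  | nil => intro i d _; rfl
  | cons q t ih =>
    intro i d h
    have hq : q.1 = k := h q (by simp)
    simp only [List.foldl_cons, pvBStep, hq, ne_eq, not_true_eq_false, if_false, reduceIte]
    exact ih i _ (fun q hq => h q (by simp [hq]))

-- the dense-rank scan over the grouped pairs equals A's enumerate-the-classes nested insertion loop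
theorem pvScan_blocks (l : List (String × String)) :
    ∀ (ks : List String) (n : Nat) (prev : Option String) (d : PySem.Dict String Int),
      ks.Pairwise (· < ·) →
      (∀ k ∈ ks, prev ≠ some k) →
      (∀ k ∈ ks, l.filter (fun q => q.1 == k) ≠ []) →
      ((pvBlocks l ks).foldl pvBStep (d, prev, (n : Int) - 1)).1
        = (ks.zipIdx n).foldl
            (fun d p => ((l.filter (fun q => q.1 == p.1)).map (fun q => q.2)).foldl
              (fun d s => d.insert s ((p.2 : Nat) : Int)) d) d := by
  intro ks
  induction ks with
  | nil => intro n prev d _ _ _; rfl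
  | cons k t ih =>
    intro n prev d hpw hprev hne
    have hpwk := (List.pairwise_cons.mp hpw).1
    have hpwt := (List.pairwise_cons.mp hpw).2
    obtain ⟨q0, rest, hq⟩ := List.exists_cons_of_ne_nil (hne k (by simp))
    have hall : ∀ q ∈ l.filter (fun q => q.1 == k), q.1 = k := by
      intro q hmem
      have := (List.mem_filter.mp hmem).2
      simpa [beq_iff_eq] using this
    have hq0 : q0.1 = k := hall q0 (by simp [hq])
    have hrest : ∀ q ∈ rest, q.1 = k := fun q hm => hall q (by simp [hq, hm])
    have hbl : pvBlocks l (k :: t) = List.filter (fun q => q.1 == k) l ++ pvBlocks l t := by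
      simp [pvBlocks, List.flatMap_cons]
    have hstep : pvBStep (d, prev, (n : Int) - 1) q0
        = (d.insert q0.2 ((n : Nat) : Int), some k, ((n : Nat) : Int)) := by
      simp only [pvBStep, hq0]
      have : prev ≠ some k := hprev k (by simp)
      simp [this]
    rw [hbl, List.foldl_append, hq, List.foldl_cons, hstep, pvScan_const k rest _ _ hrest]
    have hidx : ((n : Nat) : Int) = ((n + 1 : Nat) : Int) - 1 := by push_cast; ring
    rw [hidx, ih (n + 1) (some k) _ hpwt
      (by intro k' hk'; simp only [ne_eq, Option.some.injEq]; exact ne_of_lt (hpwk k' hk'))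
      (fun k' hk' => hne k' (by simp [hk']))]
    rw [List.zipIdx_cons, List.foldl_cons]
    congr 1
    rw [← hidx, hq]
    simp [List.foldl_map]

-- B's dense_labels equals A's label construction from the per-class lists dict, for any pairs list
theorem pvDense_eq_label (l : List (String × String)) :
    dense_labels l
      = (((PySem.List.sorted
            ((l.foldl (fun d p => d.modify p.1 [] (fun xs => xs ++ [p.2])) PySem.Dict.empty).keys)
            (fun k => k) false).zipIdx).foldl
          (fun (d : PySem.Dict String Int) p =>
            ((l.foldl (fun d p => d.modify p.1 [] (fun xs => xs ++ [p.2])) PySem.Dict.empty).getD p.1 []).foldl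
              (fun d s => d.insert s ((p.2 : Nat) : Int)) d)
          PySem.Dict.empty).items := by
  have hkeys : (l.foldl (fun d p => d.modify p.1 [] (fun xs => xs ++ [p.2])) PySem.Dict.empty).keys
      = PySem.Set.ofList (l.map (fun p => p.1)) := by
    rw [PySem.Dict.keys_foldl_modify_key l (fun p => p.1) [] (fun _ p => (fun xs => xs ++ [p.2]))]
    simp [PySem.Set.update_nil_left]
  have hgetD : ∀ c, (l.foldl (fun d p => d.modify p.1 [] (fun xs => xs ++ [p.2])) PySem.Dict.empty).getD c []
      = (l.filter (fun p => p.1 == c)).map (fun q => q.2) := by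
    intro c
    rw [PySem.Dict.getD_foldl_modify_append]
    simp
  rw [hkeys]
  set ks := PySem.List.sorted (PySem.Set.ofList (l.map (fun p => p.1))) (fun k => k) false with hks
  have hpw : ks.Pairwise (· < ·) := PySem.List.sorted_ofList_pairwise_lt _
  have hne : ∀ k ∈ ks, l.filter (fun q => q.1 == k) ≠ [] := by
    intro k hk
    have : k ∈ l.map (fun p => p.1) := (PySem.Set.mem_ofList _ _).mp ((PySem.List.mem_sorted _ _ _ _).mp hk)
    obtain ⟨q, hq, hqk⟩ := List.mem_map.mp this
    exact List.ne_nil_of_mem (List.mem_filter.mpr ⟨hq, by simp [hqk]⟩)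
  have hscan := pvScan_blocks l ks 0 none PySem.Dict.empty hpw (by simp) hne
  unfold dense_labels
  rw [pvSorted_pairs_eq_blocks l, ← hks]
  have h0 : ((0 : Nat) : Int) - 1 = (-1 : Int) := by norm_num
  rw [← h0, hscan]
  congr 1
  apply PySem.List.foldl_congr_mem
  intro d p _
  rw [hgetD]

-- A's grouping loop over signs splits into independent folds over B's cons/vowel pair lists
theorem pvGroup_split (ipa : PySem.Dict String String) :
    ∀ (signs : List String) (d1 d2 : PySem.Dict String (List String)),
      signs.foldl
        (fun (st : PySem.Dict String (List String) × PySem.Dict String (List String)) sign =>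
          match ipa.get? sign with
          | none => st
          | some x =>
            if x = "-" then st
            else
              let c := extract_consonant sign
              let v := extract_vowel sign
              (st.1.modify c [] (fun l => l ++ [sign]),
               match v with
               | some vv => if vv = "" then st.2 else st.2.modify vv [] (fun l => l ++ [sign])
               | none => st.2))
        (d1, d2)
      = (((signs.filter (fun s => ipa.getD s "-" ≠ "-")).map (fun s => (extract_consonant s, s))).foldl
           (fun d p => d.modify p.1 [] (fun xs => xs ++ [p.2])) d1,
         ((signs.filter (fun s => ipa.getD s "-" ≠ "-")).filterMap (fun s =>
            match extract_vowel s with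
            | some v => if v = "" then none else some (v, s)
            | none => none)).foldl
           (fun d p => d.modify p.1 [] (fun xs => xs ++ [p.2])) d2) := by
  intro signs
  induction signs with
  | nil => intro d1 d2; rfl
  | cons s t ih =>
    intro d1 d2
    have hgd : ipa.getD s "-" = (ipa.get? s).getD "-" := PySem.Dict.getD_eq_get?_getD ipa s "-"
    cases hg : ipa.get? s with
    | none =>
      have hbool : (decide (ipa.getD s "-" ≠ "-")) = false := by simp [hgd, hg]
      simp only [List.foldl_cons, hg, List.filter_cons, hbool, Bool.false_eq_true, if_false]
      exact ih d1 d2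
    | some x =>
      by_cases hx : x = "-"
      · have hbool : (decide (ipa.getD s "-" ≠ "-")) = false := by simp [hgd, hg, hx]
        simp only [List.foldl_cons, hg, hx, if_true, List.filter_cons, hbool, Bool.false_eq_true,
          if_false, reduceIte]
        exact ih d1 d2
      · have hbool : (decide (ipa.getD s "-" ≠ "-")) = true := by simp [hgd, hg, hx]
        simp only [List.foldl_cons, hg, if_neg hx, List.filter_cons, hbool, if_true]
        cases hv : extract_vowel s with
        | none =>
          simp only [List.map_cons, List.filterMap_cons, hv, List.foldl_cons]
          exact ih _ d2
        | some vv =>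
          by_cases hvv : vv = ""
          · simp only [List.map_cons, List.filterMap_cons, hv, hvv, if_pos rfl, List.foldl_cons,
              if_true, reduceIte]
            exact ih _ d2
          · simp only [List.map_cons, List.filterMap_cons, hv, if_neg hvv, List.foldl_cons]
            exact ih _ _

-- ===== VERDICT (by name: the statement is the Claim_ definition above) =====
theorem build_lb_ground_truth_spec : Claim_equal_build_lb_ground_truth := by
  intro signs sign_to_ipa _
  show build_lb_ground_truth signs sign_to_ipa = build_lb_ground_truth_alt signs sign_to_ipa
  simp only [build_lb_ground_truth, build_lb_ground_truth_alt]
  rw [pvGroup_split]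
  rw [pvDense_eq_label, pvDense_eq_label]
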